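-- pv_equiv track=rewrite | github.com/dcmouser/hlweb2 | hldjango/code/lib/jr/jrfuncs.py | calcTextPositionStyle
-- ===== SOURCE A (Python) =====
-- def calcTextPositionStyle(text):
--     # return one of: ['linestart', 'sentence', 'midsentence']
--     # linestart: next text starts a line
--     # sentence: next text starts a sentence (could be after a : for example
--     # midstentence: should start with lowercase
--     spaceCharacters = [' ']
--     sentenceCharacters = [':', '.', '@', '$', '&', '*', '%']
--     linestartCararacters = ['\n', '\t']
--     quoteCharacters = ['"', "'"]
--     #
--     if (len(text)==0):
--         return 'linestart'
--     pos = len(text)-1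
--     while (pos>=0):
--         c = text[pos]
--         pos -= 1
--         if (c in spaceCharacters):
--             continue
--         if (c in quoteCharacters):
--             continue
--         if (c in sentenceCharacters):
--             return 'sentence'
--         if (c in linestartCararacters):
--             return 'linestart'
--         # something else
--         return 'midsentence'
--     # at start of line
--     return 'linestart'
-- ===== SOURCE B (Python) =====
-- def calcTextPositionStyle(text):
--     # forward single pass: maintain the running classification as each character arrives;
--     # spaces/quotes leave the state unchanged, every other character overwrites it
--     style = 'linestart'
--     for c in text:
--         if c in ' "\'':
--             continue
--         if c in ':.@$&*%':
--             style = 'sentence'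
--         elif c in '\n\t':
--             style = 'linestart'
--         else:
--             style = 'midsentence'
--     return style
-- ===== Notes on version B (the rewrite author's own statement) =====
-- stated objective: alternative
-- what changed: Replaces A's backward while-loop that searches for the last significant character and returns early with a forward left-to-right fold that maintains the running classification as an accumulator, spaces/quotes leaving it unchanged.
import Mathlib
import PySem

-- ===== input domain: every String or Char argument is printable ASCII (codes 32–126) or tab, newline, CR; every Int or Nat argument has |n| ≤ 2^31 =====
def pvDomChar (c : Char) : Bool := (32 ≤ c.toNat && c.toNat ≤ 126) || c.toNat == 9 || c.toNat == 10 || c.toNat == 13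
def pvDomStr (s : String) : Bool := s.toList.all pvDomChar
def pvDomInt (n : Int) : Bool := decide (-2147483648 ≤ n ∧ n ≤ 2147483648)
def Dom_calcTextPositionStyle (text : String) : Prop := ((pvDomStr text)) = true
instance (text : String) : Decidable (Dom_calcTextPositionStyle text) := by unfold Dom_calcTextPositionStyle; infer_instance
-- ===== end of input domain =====

-- B replaces A's backward early-return search loop by a forward left fold carrying the running classification (alternative decomposition).


-- ===== PORT A =====
-- A's while-loop walks pos from len(text)-1 down to 0; iterating the reversed character
-- list visits exactly the same characters in the same order.
def calcA_loop : List Char → String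
  | [] => "linestart"                                     -- loop fell off the front: at start of line
  | c :: rest =>
    if c ∈ [' '] then calcA_loop rest                     -- c in spaceCharacters: continue
    else if c ∈ ['"', '\''] then calcA_loop rest          -- c in quoteCharacters: continue
    else if c ∈ [':', '.', '@', '$', '&', '*', '%'] then "sentence"
    else if c ∈ ['\n', '\t'] then "linestart"
    else "midsentence"

def calcTextPositionStyle (text : String) : String :=
  if text.length == 0 then "linestart"
  else calcA_loop text.toList.reverse

-- ===== PORT B =====
-- one forward pass: each non-space/quote character overwrites the running style
def calcB_upd (style : String) (c : Char) : String :=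
  if c = ' ' || c = '"' || c = '\'' then style
  else if c ∈ [':', '.', '@', '$', '&', '*', '%'] then "sentence"
  else if c ∈ ['\n', '\t'] then "linestart"
  else "midsentence"

def calcTextPositionStyle_alt (text : String) : String :=
  text.toList.foldl calcB_upd "linestart"

-- ===== PRECONDITION & SPEC =====
def Spec_calcTextPositionStyle (text : String) (out : String) : Prop := out = calcTextPositionStyle_alt text
instance (text : String) (out : String) : Decidable (Spec_calcTextPositionStyle text out) := by unfold Spec_calcTextPositionStyle; infer_instance

-- ===== CLAIM (what is proved, stated in full; the proofs are below) =====
def Claim_equal_calcTextPositionStyle : Prop := ∀ (text : String), Dom_calcTextPositionStyle text → Spec_calcTextPositionStyle text (calcTextPositionStyle text)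

-- ===== LEMMAS AND PROOFS =====

-- A's skip-loop is exactly "drop the leading space/quote run, classify the next char".
theorem calcA_loop_eq (l : List Char) :
    calcA_loop l =
      match l.dropWhile (fun c => c = ' ' || c = '"' || c = '\'') with
      | [] => "linestart"
      | c :: _ =>
        if c ∈ [':', '.', '@', '$', '&', '*', '%'] then "sentence"
        else if c ∈ ['\n', '\t'] then "linestart"
        else "midsentence" := by
  induction l with
  | nil => rfl
  | cons c rest ih =>
    by_cases h : (c = ' ' || c = '"' || c = '\'') = true
    · have hd : (c :: rest).dropWhile (fun c => c = ' ' || c = '"' || c = '\'') =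
          rest.dropWhile (fun c => c = ' ' || c = '"' || c = '\'') := by
        simp [List.dropWhile, h]
      rw [hd, ← ih]
      simp only [Bool.or_eq_true, decide_eq_true_eq] at h
      rcases h with (h | h) | h <;> simp [calcA_loop, h]
    · have hd : (c :: rest).dropWhile (fun c => c = ' ' || c = '"' || c = '\'') = c :: rest := by
        simp [List.dropWhile, h]
      rw [hd]
      simp only [Bool.or_eq_true, decide_eq_true_eq, not_or] at h
      obtain ⟨⟨h1, h2⟩, h3⟩ := h
      simp [calcA_loop, h1, h2, h3]

-- B's forward fold remembers exactly the classification of the last non-space/quote char.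
theorem calcB_fold_eq (l : List Char) (s : String) :
    l.foldl calcB_upd s =
      match l.reverse.dropWhile (fun c => c = ' ' || c = '"' || c = '\'') with
      | [] => s
      | c :: _ =>
        if c ∈ [':', '.', '@', '$', '&', '*', '%'] then "sentence"
        else if c ∈ ['\n', '\t'] then "linestart"
        else "midsentence" := by
  induction l generalizing s with
  | nil => rfl
  | cons c rest ih =>
    have hr : (c :: rest).reverse = rest.reverse ++ [c] := by simp
    rw [List.foldl_cons, ih, hr, List.dropWhile_append]
    by_cases he : (rest.reverse.dropWhile (fun c => c = ' ' || c = '"' || c = '\'')).isEmpty = true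
    · rw [if_pos he]
      by_cases h : (c = ' ' || c = '"' || c = '\'') = true
      · have : calcB_upd s c = s := by simp [calcB_upd, h]
        simp [List.dropWhile, h, this, List.isEmpty_iff.mp he]
      · simp only [Bool.or_eq_true, decide_eq_true_eq, not_or] at h
        obtain ⟨⟨h1, h2⟩, h3⟩ := h
        simp [List.dropWhile, calcB_upd, h1, h2, h3, List.isEmpty_iff.mp he]
    · rw [if_neg he]
      cases hd : rest.reverse.dropWhile (fun c => c = ' ' || c = '"' || c = '\'') with
      | nil => simp [hd] at he
      | cons d t => simp [hd]

-- ===== VERDICT (by name: the statement is the Claim_ definition above) =====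
theorem calcTextPositionStyle_spec : Claim_equal_calcTextPositionStyle := by
  intro text _
  show calcTextPositionStyle text = calcTextPositionStyle_alt text
  unfold calcTextPositionStyle calcTextPositionStyle_alt
  rw [calcB_fold_eq]
  by_cases he : text.length == 0
  · have h0 : text.toList = [] := by
      have hl : text.length = 0 := by simpa using he
      have : text.toList.length = 0 := by rw [String.length_toList]; exact hl
      exact List.eq_nil_of_length_eq_zero this
    simp [he, h0]
  · rw [if_neg he, calcA_loop_eq]
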